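-- pv_equiv track=rewrite | github.com/Kulak-Informatica/BeginselenVanProgrammeren | les4/4-Dobbelstenen.py | indicate
-- ===== SOURCE A (Python) =====
-- def indicate(start, length, elements):
--     indicated_string = ""
--     end = start + length - 1  # Reasoning: say start 0 and length 1, end has to be 0 as well. That's why I subtract 1
--     last_index = len(elements) - 1  # the index of the last number
--     i = 0  # Current index of the loop
--
--     for element in elements:
--         # the number we're at is the start of the longest: add an opening bracket
--         if i == start:
--             indicated_string += "("
--
--         # add the number
--         indicated_string += str(element)
--
--         # the number we're at is the end of the longest: add a closing bracket
--         if i == end: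
--             indicated_string += ")"
--
--         # the number we're at is not the last: add a space between this number and the next
--         if i != last_index:
--             indicated_string += " "
--
--         # update the index for the next number
--         i += 1
--
--     return indicated_string
-- ===== SOURCE B (Python) =====
-- def indicate(start, length, elements):
--     parts = [str(e) for e in elements]
--     end = start + length - 1
--     if 0 <= start < len(parts):
--         parts[start] = "(" + parts[start]
--     if 0 <= end < len(parts):
--         parts[end] = parts[end] + ")"
--     return " ".join(parts)
-- ===== Notes on version B (the rewrite author's own statement) =====
-- stated objective: simpler
-- what changed: Replaces the index-tracking accumulation loop (three conditionals per element, repeated string concatenation) by list construction, two bounds-guarded index mutations for the brackets, and a single ' '.join.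
import Mathlib
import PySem

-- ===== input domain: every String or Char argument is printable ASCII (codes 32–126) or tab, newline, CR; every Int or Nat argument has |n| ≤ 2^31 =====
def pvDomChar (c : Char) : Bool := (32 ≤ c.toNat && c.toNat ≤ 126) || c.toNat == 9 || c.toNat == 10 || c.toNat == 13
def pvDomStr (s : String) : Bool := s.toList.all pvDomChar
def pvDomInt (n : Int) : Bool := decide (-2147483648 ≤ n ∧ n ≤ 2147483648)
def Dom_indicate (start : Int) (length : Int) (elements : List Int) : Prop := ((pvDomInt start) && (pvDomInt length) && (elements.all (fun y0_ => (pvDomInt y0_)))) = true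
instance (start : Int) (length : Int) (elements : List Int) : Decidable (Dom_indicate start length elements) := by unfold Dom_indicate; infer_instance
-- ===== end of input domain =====

-- B replaces A's single accumulation loop (index counter + three conditionals per element)
-- by building the list of rendered numbers, two bounds-guarded index mutations for the
-- brackets, and one ' '.join — a simpler decomposition, same cost.

-- ===== PORT A =====
def indicateLoop (start endi last : Int) : List Int → Int → String → String
  | [], _, acc => acc
  | e :: rest, i, acc =>
      let acc1 := if i = start then acc ++ "(" else acc
      let acc2 := acc1 ++ PySem.Int.toStr e
      let acc3 := if i = endi then acc2 ++ ")" else acc2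
      let acc4 := if i ≠ last then acc3 ++ " " else acc3
      indicateLoop start endi last rest (i + 1) acc4

def indicate (start : Int) (length : Int) (elements : List Int) : String :=
  let endi := start + length - 1
  let last : Int := (elements.length : Int) - 1
  indicateLoop start endi last elements 0 ""

-- ===== PORT B =====
def indicate_alt (start : Int) (length : Int) (elements : List Int) : String :=
  let parts := elements.map PySem.Int.toStr
  let endi := start + length - 1
  let parts2 := if 0 ≤ start ∧ start < (parts.length : Int) then parts.modify start.toNat (fun p => "(" ++ p) else parts
  let parts3 := if 0 ≤ endi ∧ endi < (parts2.length : Int) then parts2.modify endi.toNat (fun p => p ++ ")") else parts2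
  PySem.Str.join " " parts3

-- ===== PRECONDITION & SPEC =====
def Spec_indicate (start : Int) (length : Int) (elements : List Int) (out : String) : Prop := out = indicate_alt start length elements
instance (start : Int) (length : Int) (elements : List Int) (out : String) : Decidable (Spec_indicate start length elements out) := by unfold Spec_indicate; infer_instance

-- ===== CLAIM (what is proved, stated in full; the proofs are below) =====
def Claim_equal_indicate : Prop := ∀ (start : Int) (length : Int) (elements : List Int), Dom_indicate start length elements → Spec_indicate start length elements (indicate start length elements)

-- ===== LEMMAS AND PROOFS =====

-- common semantic skeleton: the bracketed rendering of each element, shifted per step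
def wrapC (s e : Int) (x : Int) : List Char :=
  (if s = 0 then ['('] else []) ++ PySem.Int.toChars x ++ (if e = 0 then [')'] else [])

def pieces (s e : Int) : List Int → List (List Char)
  | [] => []
  | x :: xs => wrapC s e x :: pieces (s - 1) (e - 1) xs

-- the string A's loop body appends in one iteration, written out
def stepAcc (s e last i : Int) (x : Int) (acc : String) : String :=
  if i ≠ last then
    (if i = e then (if i = s then acc ++ "(" else acc) ++ PySem.Int.toStr x ++ ")"
     else (if i = s then acc ++ "(" else acc) ++ PySem.Int.toStr x) ++ " "
  else
    (if i = e then (if i = s then acc ++ "(" else acc) ++ PySem.Int.toStr x ++ ")"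
     else (if i = s then acc ++ "(" else acc) ++ PySem.Int.toStr x)

lemma indicateLoop_cons (s e last : Int) (x : Int) (rest : List Int) (i : Int) (acc : String) :
    indicateLoop s e last (x :: rest) i acc
      = indicateLoop s e last rest (i + 1) (stepAcc s e last i x acc) := rfl

-- B-side: one guarded in-place modification, abstracted over the edit
def applyAt (f : String → String) (s : Int) (ps : List String) : List String :=
  if 0 ≤ s ∧ s < (ps.length : Int) then ps.modify s.toNat f else ps

lemma applyAt_nil (f : String → String) (s : Int) : applyAt f s [] = [] := by
  unfold applyAt; split_ifs with h
  · cases hk : s.toNat <;> rfl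
  · rfl

lemma applyAt_cons (f : String → String) (s : Int) (p : String) (ps : List String) :
    applyAt f s (p :: ps) = (if s = 0 then f p else p) :: applyAt f (s - 1) ps := by
  have hlen : ((p :: ps).length : Int) = (ps.length : Int) + 1 := by
    simp [List.length_cons]
  unfold applyAt
  by_cases h0 : s = 0
  · subst h0
    rw [if_pos ⟨le_refl 0, by omega⟩, if_pos rfl,
        if_neg (by intro hc; omega)]
    rfl
  · rw [if_neg h0]
    by_cases h1 : 0 ≤ s ∧ s < ((p :: ps).length : Int)
    · rw [if_pos h1, if_pos (by omega),
          show s.toNat = (s - 1).toNat + 1 by omega]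
      rfl
    · rw [if_neg h1, if_neg (by intro hc; exact h1 ⟨by omega, by omega⟩)]

lemma lparen_toList : ("(" : String).toList = ['('] := by decide
lemma rparen_toList : (")" : String).toList = [')'] := by decide
lemma space_toList : (" " : String).toList = [' '] := by decide

lemma wrapC_shift (s e i : Int) (x : Int) :
    wrapC (s - i) (e - i) x
      = (if i = s then ['('] else []) ++ PySem.Int.toChars x ++ (if i = e then [')'] else []) := by
  unfold wrapC
  simp only [sub_eq_zero, eq_comm]

lemma parts_eq (xs : List Int) : ∀ s e : Int,
    (applyAt (fun p => p ++ ")") e (applyAt (fun p => "(" ++ p) s (xs.map PySem.Int.toStr))).map String.toList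
      = pieces s e xs := by
  induction xs with
  | nil => intro s e; simp [applyAt_nil, pieces]
  | cons x rest ih =>
      intro s e
      rw [List.map_cons, applyAt_cons, applyAt_cons, List.map_cons, ih, pieces]
      congr 1
      by_cases hs : s = 0 <;> by_cases he : e = 0 <;>
        simp [wrapC, hs, he, String.toList_append, lparen_toList, rparen_toList,
              PySem.Int.toList_toStr]

lemma stepAcc_ne (s e last i : Int) (x : Int) (acc : String) (hne : i ≠ last) :
    (stepAcc s e last i x acc).toList = acc.toList ++ wrapC (s - i) (e - i) x ++ [' '] := by
  unfold stepAcc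
  rw [if_pos hne, wrapC_shift]
  split_ifs <;>
    simp [String.toList_append, lparen_toList, rparen_toList, space_toList,
          PySem.Int.toList_toStr]

lemma stepAcc_last (s e last i : Int) (x : Int) (acc : String) (hil : i = last) :
    (stepAcc s e last i x acc).toList = acc.toList ++ wrapC (s - i) (e - i) x := by
  unfold stepAcc
  rw [if_neg (by simp [hil]), wrapC_shift]
  split_ifs <;>
    simp [String.toList_append, lparen_toList, rparen_toList,
          PySem.Int.toList_toStr]

lemma loop_eq (s e : Int) : ∀ (xs : List Int) (i last : Int) (acc : String),
    last = i + (xs.length : Int) - 1 →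
    (indicateLoop s e last xs i acc).toList
      = acc.toList ++ PySem.Chars.join [' '] (pieces (s - i) (e - i) xs) := by
  intro xs
  induction xs with
  | nil =>
      intro i last acc _
      simp [indicateLoop, pieces, PySem.Chars.join_nil]
  | cons x rest ih =>
      intro i last acc h
      rw [indicateLoop_cons]
      cases rest with
      | nil =>
          have hil : i = last := by simp at h; omega
          rw [show indicateLoop s e last [] (i + 1) (stepAcc s e last i x acc)
                = stepAcc s e last i x acc from rfl,
              show pieces (s - i) (e - i) [x] = [wrapC (s - i) (e - i) x] from rfl,
              PySem.Chars.join_singleton, stepAcc_last s e last i x acc hil]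
      | cons y t =>
          have hne : i ≠ last := by simp at h; omega
          have h' : last = (i + 1) + (((y :: t).length : Int)) - 1 := by
            simp at h ⊢; omega
          rw [ih (i + 1) last _ h', stepAcc_ne s e last i x acc hne,
              show s - (i + 1) = s - i - 1 by ring,
              show e - (i + 1) = e - i - 1 by ring,
              show pieces (s - i) (e - i) (x :: y :: t)
                = wrapC (s - i) (e - i) x
                    :: wrapC (s - i - 1) (e - i - 1) y
                    :: pieces (s - i - 1 - 1) (e - i - 1 - 1) t from rfl,
              PySem.Chars.join_cons_cons,
              show wrapC (s - i - 1) (e - i - 1) y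
                    :: pieces (s - i - 1 - 1) (e - i - 1 - 1) t
                = pieces (s - i - 1) (e - i - 1) (y :: t) from rfl]
          simp [List.append_assoc]

lemma alt_eq (start length : Int) (elements : List Int) :
    indicate_alt start length elements
      = PySem.Str.join " "
          (applyAt (fun p => p ++ ")") (start + length - 1)
            (applyAt (fun p => "(" ++ p) start (elements.map PySem.Int.toStr))) := rfl

-- ===== VERDICT (by name: the statement is the Claim_ definition above) =====
theorem indicate_spec : Claim_equal_indicate := by
  intro start length elements _
  unfold Spec_indicate
  apply String.ext
  rw [alt_eq, PySem.Str.toList_join, space_toList, parts_eq]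
  show (indicate start length elements).toList = _
  simp only [indicate]
  rw [loop_eq _ _ elements 0 _ "" (by omega)]
  simp
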